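-- pv_equiv track=rewrite | github.com/Nanthini-123/AI_SupplyChain_Disruption_And_Risk_Monitoring_System | supplier_recommendation/recommend_supplier.py | recommend_supplier
-- ===== SOURCE A (Python) =====
-- def recommend_supplier(order_row, supplier_reliability):
--     """
--     Recommend an alternate supplier if the current one is risky
--     """
--     current_supplier = order_row['Supplier_ID']
--     current_reliability = supplier_reliability.get(current_supplier, 50)
--
--     # If reliability < 75%, find better supplier with same category
--     if current_reliability < 75:
--         better = {k:v for k,v in supplier_reliability.items() if v >= 75}
--         if better:
--             recommended = max(better, key=better.get)
--             return recommended
--     return current_supplier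
-- ===== SOURCE B (Python) =====
-- def recommend_supplier(order_row, supplier_reliability):
--     """
--     Recommend an alternate supplier if the current one is risky
--     (sort-based re-implementation: rank all suppliers by reliability
--     descending with a stable sort and inspect the top of the ranking)
--     """
--     current_supplier = order_row['Supplier_ID']
--     if supplier_reliability.get(current_supplier, 50) >= 75:
--         return current_supplier
--     ranked = sorted(supplier_reliability.items(), key=lambda p: -p[1])
--     if ranked and ranked[0][1] >= 75:
--         return ranked[0][0]
--     return current_supplier
-- ===== Notes on version B (the rewrite author's own statement) =====
-- stated objective: alternative
-- what changed: A builds a filtered dict of suppliers with reliability >= 75 and takes max over it with a key-function lookup; B instead stably sorts all suppliers by reliability descending and reads the top of the ranking, returning it only if it qualifies (>= 75) -- correct because the global maximum equals the maximum of the qualifying subset whenever that subset is nonempty, and stable sorting preserves A's first-of-ties choice.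
import Mathlib
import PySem

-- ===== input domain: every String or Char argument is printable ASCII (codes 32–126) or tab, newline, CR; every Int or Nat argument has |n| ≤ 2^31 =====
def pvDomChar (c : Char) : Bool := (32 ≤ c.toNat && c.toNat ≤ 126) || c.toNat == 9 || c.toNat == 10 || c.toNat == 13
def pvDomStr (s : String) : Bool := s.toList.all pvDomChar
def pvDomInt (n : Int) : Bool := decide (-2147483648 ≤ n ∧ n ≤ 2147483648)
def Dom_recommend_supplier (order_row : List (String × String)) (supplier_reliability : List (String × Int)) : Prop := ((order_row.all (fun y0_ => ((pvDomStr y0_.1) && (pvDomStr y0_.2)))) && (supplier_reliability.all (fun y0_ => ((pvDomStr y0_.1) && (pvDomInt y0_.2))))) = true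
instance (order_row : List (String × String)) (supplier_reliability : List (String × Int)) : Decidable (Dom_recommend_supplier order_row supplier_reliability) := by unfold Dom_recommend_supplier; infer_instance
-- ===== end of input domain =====

-- B replaces A's build-filtered-dict-then-max with a stable sort of all suppliers by reliability
-- descending followed by a look at the top of the ranking (objective: alternative algorithm).

-- ===== PORT A =====
-- literal port of A: dicts are PySem.Dict built from the association lists;
-- 'max(better, key=better.get)' is max? over better.keys with the dict lookup as key
-- (the lookup never misses a key of better, so better.get k = better.getD k 0 there);
-- the 'none' fallback of the match is unreachable ('if better' guards the max).
def recommend_supplier (order_row : List (String × String)) (supplier_reliability : List (String × Int)) : String :=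
  let sr : PySem.Dict String Int := PySem.Dict.ofList supplier_reliability
  let current_supplier := (((PySem.Dict.ofList order_row).get? "Supplier_ID").getD "")  -- KeyError when missing: excluded by Pre_
  let current_reliability := sr.getD current_supplier 50
  if current_reliability < 75 then
    let better : PySem.Dict String Int :=
      PySem.Dict.ofList (sr.items.filter (fun p => decide (75 ≤ p.2)))
    if better.items.isEmpty then current_supplier
    else
      match PySem.List.max? better.keys (fun k => better.getD k 0) with
      | some recommended => recommended
      | none => current_supplier
  else current_supplier

-- ===== PORT B =====
-- literal port of B: 'sorted(items, key=lambda p: -p[1])' is PySem.List.sorted with key (fun p => -p.2);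
-- 'if ranked and ranked[0][1] >= 75' is the match on the sorted list's head.
def recommend_supplier_alt (order_row : List (String × String)) (supplier_reliability : List (String × Int)) : String :=
  let sr : PySem.Dict String Int := PySem.Dict.ofList supplier_reliability
  let current_supplier := (((PySem.Dict.ofList order_row).get? "Supplier_ID").getD "")  -- KeyError when missing: excluded by Pre_
  if 75 ≤ sr.getD current_supplier 50 then current_supplier
  else
    let ranked := PySem.List.sorted sr.items (fun p => -p.2) false
    match ranked with
    | r :: _ => if 75 ≤ r.2 then r.1 else current_supplier
    | [] => current_supplier

-- ===== PRECONDITION & SPEC =====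
-- Pre_ excludes exactly the inputs where A raises KeyError: order_row without a 'Supplier_ID' key.
def Pre_recommend_supplier (order_row : List (String × String)) (supplier_reliability : List (String × Int)) : Prop :=
  "Supplier_ID" ∈ order_row.map Prod.fst
instance (order_row : List (String × String)) (supplier_reliability : List (String × Int)) : Decidable (Pre_recommend_supplier order_row supplier_reliability) := by unfold Pre_recommend_supplier; infer_instance
def pvWitness_recommend_supplier : (List (String × String)) × (List (String × Int)) :=
  ([("Supplier_ID", "S1")], [("S1", 60), ("S2", 90)])
def Spec_recommend_supplier (order_row : List (String × String)) (supplier_reliability : List (String × Int)) (out : String) : Prop := out = recommend_supplier_alt order_row supplier_reliability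
instance (order_row : List (String × String)) (supplier_reliability : List (String × Int)) (out : String) : Decidable (Spec_recommend_supplier order_row supplier_reliability out) := by unfold Spec_recommend_supplier; infer_instance

-- ===== CLAIM (what is proved, stated in full; the proofs are below) =====
def Claim_equal_recommend_supplier : Prop := ∀ (order_row : List (String × String)) (supplier_reliability : List (String × Int)), Dom_recommend_supplier order_row supplier_reliability → Pre_recommend_supplier order_row supplier_reliability → Spec_recommend_supplier order_row supplier_reliability (recommend_supplier order_row supplier_reliability)

-- ===== LEMMAS AND PROOFS =====

-- the running-first-max step (the step of PySem.List.max?) and its first-min twin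
def maxStep {α : Type} (k : α → Int) (acc : Option α) (x : α) : Option α :=
  match acc with
  | none => some x
  | some m => if k m < k x then some x else some m

def minStep {α : Type} (k : α → Int) (acc : Option α) (x : α) : Option α :=
  match acc with
  | none => some x
  | some m => if k x < k m then some x else some m

-- Dict.update on fresh, distinct keys just appends the pairs.
lemma items_update_of_nodup {κ ν : Type} [BEq κ] [LawfulBEq κ]
    (l : List (κ × ν)) (d : PySem.Dict κ ν)
    (h : (l.map Prod.fst).Nodup) (hd : ∀ p ∈ l, d.contains p.1 = false) :
    (d.update l).items = d.items ++ l := by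
  induction l generalizing d with
  | nil => simp [PySem.Dict.update]
  | cons p t ih =>
    simp only [List.map_cons, List.nodup_cons] at h
    have hins : (d.insert p.1 p.2).items = d.items ++ [p] := by
      simpa using PySem.Dict.items_insert_of_not_contains d p.2 (hd p (by simp))
    have hstep : (d.update (p :: t)) = (d.insert p.1 p.2).update t := by
      simp [PySem.Dict.update]
    rw [hstep, ih _ h.2]
    · simp [hins]
    · intro q hq
      rw [PySem.Dict.contains_insert]
      have h1 : d.contains q.1 = false := hd q (by simp [hq])
      have h2 : q.1 ≠ p.1 := by
        intro heq
        exact h.1 (heq ▸ (List.mem_map_of_mem hq))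
      simp [h1, h2]

lemma items_ofList_of_nodup {κ ν : Type} [BEq κ] [LawfulBEq κ]
    (l : List (κ × ν)) (h : (l.map Prod.fst).Nodup) :
    (PySem.Dict.ofList l).items = l := by
  have := items_update_of_nodup l PySem.Dict.empty h (by intro p _; rfl)
  simpa [PySem.Dict.ofList, PySem.Dict.empty] using this

-- the first-max over keys with a key-function reading the value = fst of the first-max over the pairs
lemma foldl_max_key_fst (g : String → Int) :
    ∀ (f : List (String × Int)) (acc : Option (String × Int)),
    (∀ p ∈ f, g p.1 = p.2) → (∀ b, acc = some b → g b.1 = b.2) →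
    (f.map Prod.fst).foldl (maxStep g) (acc.map Prod.fst)
    = ((f.foldl (maxStep (fun p => p.2)) acc).map Prod.fst) := by
  intro f
  induction f with
  | nil => intro acc _ _; rfl
  | cons p t ih =>
    intro acc hg hacc
    have hp : g p.1 = p.2 := hg p (by simp)
    have hgt : ∀ q ∈ t, g q.1 = q.2 := fun q hq => hg q (by simp [hq])
    cases acc with
    | none =>
      simp only [List.map_cons, List.foldl_cons, Option.map_none]
      exact ih (some p) hgt (by intro b hb; cases hb; exact hp)
    | some b =>
      have hb : g b.1 = b.2 := hacc b rfl
      simp only [List.map_cons, List.foldl_cons, Option.map_some, maxStep]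
      by_cases hlt : b.2 < p.2
      · rw [if_pos (by rw [hb, hp]; exact hlt), if_pos hlt]
        exact ih (some p) hgt (by intro c hc; cases hc; exact hp)
      · rw [if_neg (by rw [hb, hp]; exact hlt), if_neg hlt]
        exact ih (some b) hgt (by intro c hc; cases hc; exact hb)

-- the head of the insertion-sort fold is the running first-min of the keys
lemma head_foldl_insertBy {α : Type} (key : α → Int) :
    ∀ (xs : List α) (acc : List α),
    (xs.foldl (fun a x => PySem.List.insertBy (fun a b => decide (key a < key b)) x a) acc).head?
    = xs.foldl (minStep key) acc.head? := by
  intro xs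
  induction xs with
  | nil => intro acc; rfl
  | cons x t ih =>
    intro acc
    simp only [List.foldl_cons]
    rw [ih]
    congr 1
    cases acc with
    | nil => rfl
    | cons y ys =>
      simp only [PySem.List.insertBy, minStep, List.head?_cons]
      by_cases h : key x < key y
      · rw [if_pos (by simpa using h), if_pos h]; rfl
      · rw [if_neg (by simpa using h), if_neg h]; rfl

-- head of the stable sort = first minimum under the key
lemma head_sorted_eq_min {α : Type} (key : α → Int) (xs : List α) :
    (PySem.List.sorted xs key false).head? = PySem.List.min? xs key := by
  rw [PySem.List.sorted_eq_foldl_insertBy]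
  exact head_foldl_insertBy key xs []

-- first-min under the negated key = first-max under the key
lemma min_neg_eq_max {α : Type} (k : α → Int) (xs : List α) :
    PySem.List.min? xs (fun x => -(k x)) = PySem.List.max? xs k := by
  show xs.foldl (minStep (fun x => -(k x))) none = xs.foldl (maxStep k) none
  congr 1
  funext acc x
  cases acc with
  | none => rfl
  | some m =>
    simp only [minStep, maxStep]
    by_cases h : k m < k x
    · rw [if_pos (by omega), if_pos h]
    · rw [if_neg (by omega), if_neg h]

-- folding the first-max step from a seed returns some element at least as large
lemma foldl_maxStep_some {α : Type} (k : α → Int) :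
    ∀ (xs : List α) (a : α), ∃ b, xs.foldl (maxStep k) (some a) = some b ∧ k a ≤ k b := by
  intro xs
  induction xs with
  | nil => intro a; exact ⟨a, rfl, le_refl _⟩
  | cons x t ih =>
    intro a
    simp only [List.foldl_cons, maxStep]
    by_cases h : k a < k x
    · rw [if_pos h]
      obtain ⟨b, hb, hle⟩ := ih x
      exact ⟨b, hb, by omega⟩
    · rw [if_neg h]
      exact ih a

-- fold from a seed in terms of the fold from none (stability of the first-max)
lemma foldl_maxStep_none_some {α : Type} (k : α → Int) :
    ∀ (xs : List α) (x : α),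
    xs.foldl (maxStep k) (some x)
    = (xs.foldl (maxStep k) none).elim (some x) (fun m => if k x < k m then some m else some x) := by
  intro xs
  induction xs with
  | nil => intro x; rfl
  | cons y ys ih =>
    intro x
    simp only [List.foldl_cons]
    have hseed : maxStep k (some x) y = if k x < k y then some y else some x := rfl
    have hseed0 : maxStep k none y = some y := rfl
    rw [hseed, hseed0, ih y]
    by_cases hxy : k x < k y
    · rw [if_pos hxy, ih y]
      rcases hr : ys.foldl (maxStep k) none with _ | m
      · simp [hxy]
      · by_cases hym : k y < k m
        · simp [hym, show k x < k m by omega]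
        · simp [hym, hxy]
    · rw [if_neg hxy, ih x]
      rcases hr : ys.foldl (maxStep k) none with _ | m
      · simp [hxy]
      · by_cases hym : k y < k m
        · simp [hym]
        · simp [hym, hxy, show ¬ k x < k m by omega]

-- filtering by a threshold does not change the fold once the seed qualifies
lemma foldl_maxStep_filter_some {α : Type} (k : α → Int) (t : Int) :
    ∀ (xs : List α) (a : α), t ≤ k a →
    (xs.filter (fun x => decide (t ≤ k x))).foldl (maxStep k) (some a)
    = xs.foldl (maxStep k) (some a) := by
  intro xs
  induction xs with
  | nil => intro a _; rfl
  | cons x rest ih =>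
    intro a ha
    by_cases h : t ≤ k x
    · rw [List.filter_cons_of_pos (by simpa using h)]
      simp only [List.foldl_cons]
      have hseed : maxStep k (some a) x = if k a < k x then some x else some a := rfl
      rw [hseed]
      by_cases hax : k a < k x
      · rw [if_pos hax]; exact ih x h
      · rw [if_neg hax]; exact ih a ha
    · rw [List.filter_cons_of_neg (by simpa using h)]
      simp only [List.foldl_cons]
      have hseed : maxStep k (some a) x = if k a < k x then some x else some a := rfl
      rw [hseed, if_neg (by omega : ¬ k a < k x)]
      exact ih a ha

-- the first-max of the ≥ t filtered list, in terms of the first-max of the whole list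
lemma foldl_maxStep_filter_none {α : Type} (k : α → Int) (t : Int) :
    ∀ (xs : List α),
    (xs.filter (fun x => decide (t ≤ k x))).foldl (maxStep k) none
    = (xs.foldl (maxStep k) none).bind (fun m => if t ≤ k m then some m else none) := by
  intro xs
  induction xs with
  | nil => rfl
  | cons x rest ih =>
    have hseed0 : maxStep k none x = some x := rfl
    by_cases h : t ≤ k x
    · rw [List.filter_cons_of_pos (by simpa using h)]
      simp only [List.foldl_cons, hseed0]
      rw [foldl_maxStep_filter_some k t rest x h]
      obtain ⟨b, hb, hle⟩ := foldl_maxStep_some k rest x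
      rw [hb]
      simp [show t ≤ k b by omega]
    · rw [List.filter_cons_of_neg (by simpa using h)]
      simp only [List.foldl_cons, hseed0]
      rw [ih, foldl_maxStep_none_some k rest x]
      rcases hr : rest.foldl (maxStep k) none with _ | m
      · simp [show ¬ t ≤ k x from h]
      · by_cases hxm : k x < k m
        · simp [hxm]
        · by_cases htm : t ≤ k m
          · exact absurd (by omega : t ≤ k x) h
          · simp [hxm, htm, show ¬ t ≤ k x from h]

-- the fold from none is none exactly on the empty list
lemma foldl_maxStep_none_iff {α : Type} (k : α → Int) (xs : List α) :
    xs.foldl (maxStep k) none = none ↔ xs = [] := by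
  cases xs with
  | nil => simp
  | cons p rest =>
    simp only [List.foldl_cons]
    have hseed : maxStep k none p = some p := rfl
    rw [hseed]
    obtain ⟨b, hb, _⟩ := foldl_maxStep_some k rest p
    simp [hb]

-- ===== VERDICT (by name: the statement is the Claim_ definition above) =====
theorem recommend_supplier_spec : Claim_equal_recommend_supplier := by
  intro order_row supplier_reliability _ _
  unfold Spec_recommend_supplier
  simp only [recommend_supplier, recommend_supplier_alt]
  set sr : PySem.Dict String Int := PySem.Dict.ofList supplier_reliability with hsr
  set cur : String := (((PySem.Dict.ofList order_row).get? "Supplier_ID").getD "") with hcur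
  by_cases hrel : sr.getD cur 50 < 75
  · have hrel' : ¬ (75 ≤ sr.getD cur 50) := by omega
    rw [if_pos hrel, if_neg hrel']
    set f : List (String × Int) := sr.items.filter (fun p => decide (75 ≤ p.2)) with hf
    have hsrnodup : (sr.items.map Prod.fst).Nodup := PySem.Dict.nodup_keys_ofList supplier_reliability
    have hfnodup : (f.map Prod.fst).Nodup :=
      hsrnodup.sublist (List.Sublist.map Prod.fst List.filter_sublist)
    have hitems : (PySem.Dict.ofList f).items = f := items_ofList_of_nodup f hfnodup
    have hkeys : (PySem.Dict.ofList f).keys = f.map Prod.fst := by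
      simp [PySem.Dict.keys, hitems]
    -- A's max over the filtered dict's keys = fst of the first-max over the filtered pairs
    have hA : PySem.List.max? (PySem.Dict.ofList f).keys (fun k => (PySem.Dict.ofList f).getD k 0)
        = (f.foldl (maxStep (fun p => p.2)) none).map Prod.fst := by
      have h0 : PySem.List.max? (PySem.Dict.ofList f).keys (fun k => (PySem.Dict.ofList f).getD k 0)
          = ((PySem.Dict.ofList f).keys).foldl (maxStep (fun k => (PySem.Dict.ofList f).getD k 0)) none := rfl
      rw [h0, hkeys]
      have := foldl_max_key_fst (fun k => (PySem.Dict.ofList f).getD k 0) f none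
        (fun p hp => PySem.Dict.getD_of_mem_items (PySem.Dict.ofList f)
          (by rw [hitems]; simpa using hp) (PySem.Dict.nodup_keys_ofList f) 0)
        (by intro b hb; cases hb)
      simpa only [Option.map_none] using this
    -- the first-max over the filtered pairs, from the first-max over all pairs
    have hfilter : f.foldl (maxStep (fun p => p.2)) none
        = (sr.items.foldl (maxStep (fun p : String × Int => p.2)) none).bind
            (fun m => if 75 ≤ m.2 then some m else none) := by
      rw [hf]
      exact foldl_maxStep_filter_none (fun p : String × Int => p.2) 75 sr.items
    -- B's sorted head = the first-max over all pairs
    have hB : (PySem.List.sorted sr.items (fun p => -p.2) false).head?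
        = sr.items.foldl (maxStep (fun p : String × Int => p.2)) none := by
      rw [head_sorted_eq_min (fun p => -p.2) sr.items]
      have := min_neg_eq_max (fun p : String × Int => p.2) sr.items
      simpa using this
    rcases hM : sr.items.foldl (maxStep (fun p : String × Int => p.2)) none with _ | m
    · -- no suppliers at all
      have hnil : sr.items = [] := (foldl_maxStep_none_iff _ _).mp hM
      have hfnil : f = [] := by rw [hf, hnil]; rfl
      rw [if_pos (by rw [hitems, hfnil]; rfl)]
      rcases hs : PySem.List.sorted sr.items (fun p => -p.2) false with _ | ⟨r, tl⟩
      · rfl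
      · rw [hs] at hB; rw [hM] at hB; cases hB
    · -- first maximal pair m of all suppliers
      rcases hs : PySem.List.sorted sr.items (fun p => -p.2) false with _ | ⟨r, tl⟩
      · rw [hs] at hB; rw [hM] at hB; cases hB
      · have hr : r = m := by rw [hs, hM] at hB; cases hB; rfl
        subst hr
        rw [hM] at hfilter
        rw [show ((some r).bind (fun m => if 75 ≤ m.2 then some m else none))
            = if 75 ≤ r.2 then some r else none from rfl] at hfilter
        by_cases hm75 : 75 ≤ r.2
        · rw [if_pos hm75] at hfilter
          have hfne : ¬ (PySem.Dict.ofList f).items.isEmpty := by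
            rw [hitems]
            intro hemp
            have : f = [] := List.isEmpty_iff.mp hemp
            rw [this] at hfilter
            cases hfilter
          rw [if_neg hfne, hA, hfilter]
          simp [hm75]
        · rw [if_neg hm75] at hfilter
          have hfnil : f = [] := (foldl_maxStep_none_iff _ _).mp hfilter
          rw [if_pos (by rw [hitems, hfnil]; rfl)]
          simp [hm75]
  · rw [if_neg hrel, if_pos (by omega : 75 ≤ sr.getD cur 50)]
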